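-- pv_equiv track=rewrite | github.com/mehkey/leetcode | python5/2457. Minimum Addition to Make Integer Beautiful.py | makeIntegerBeautiful
-- ===== SOURCE A (Python) =====
-- def makeIntegerBeautiful(n: int, target: int) -> int:
--
--     def getnum(num):
--         s = str(num)
--         total = 0
--         for c in s:
--             total += int(c)
--         return total
--
--     t= getnum(n)
--     st = str(n)
--
--     res = 0
--
--     index = len(st) - 1
--     rindex = 0
--
--     while t > target:
--
--         st = str(n)
--         extra = (10 - int(st[index]) ) * (10**rindex)
--
--         res += extra
--
--         index -= 1
--         rindex += 1
--
--         n += extra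
--
--         t = getnum(n)
--
--     return res
--
--     return -1
-- ===== SOURCE B (Python) =====
-- def makeIntegerBeautiful(n: int, target: int) -> int:
--     digits = [int(c) for c in str(n)]   # raises ValueError on '-' for negative n, like A
--
--     def carry(ds):                      # add 1 to an LSB-first digit list
--         if not ds:
--             return [1]
--         if ds[0] == 9:
--             return [0] + carry(ds[1:])
--         return [ds[0] + 1] + ds[1:]
--
--     def value(ds):
--         v = 0
--         for d in reversed(ds):
--             v = v * 10 + d
--         return v
--
--     def go(ds, s, zeros):
--         # current number = value(ds) * 10**zeros, s = sum(ds) = its digit sum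
--         if s <= target:
--             return value(ds) * 10 ** zeros - n
--         ds2 = carry(ds[1:])             # drop lowest digit, add one above it
--         return go(ds2, sum(ds2), zeros + 1)
--
--     ds0 = digits[::-1]
--     return go(ds0, sum(ds0), 0)
-- ===== Notes on version B (the rewrite author's own statement) =====
-- stated objective: alternative
-- what changed: B converts n to its digit list once and then recurses purely on that list, dropping the lowest digit and adding one with explicit carry propagation each step; it never re-converts, divides or indexes the running integer as A does, and reconstructs the answer from the final digit list.
import Mathlib
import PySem

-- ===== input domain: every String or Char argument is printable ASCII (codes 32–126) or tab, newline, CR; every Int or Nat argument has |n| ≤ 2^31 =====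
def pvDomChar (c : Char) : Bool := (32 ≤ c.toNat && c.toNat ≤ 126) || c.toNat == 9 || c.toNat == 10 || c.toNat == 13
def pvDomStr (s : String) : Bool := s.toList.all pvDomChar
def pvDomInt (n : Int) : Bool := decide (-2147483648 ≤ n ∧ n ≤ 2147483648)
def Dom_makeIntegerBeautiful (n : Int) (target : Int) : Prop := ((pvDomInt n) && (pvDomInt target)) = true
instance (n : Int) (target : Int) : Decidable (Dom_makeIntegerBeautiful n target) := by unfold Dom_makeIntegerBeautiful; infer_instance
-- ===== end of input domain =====

-- B converts n to its digit list once and then recurses on that list (drop the lowest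
-- digit, add one with carry propagation), never re-converting or dividing the running
-- integer as A does (objective: alternative).

-- ===== PORT A =====

/-- A's inner `getnum`: `total = 0; for c in str(num): total += int(c)`.
`none` is exactly where `int(c)` raises ValueError (the '-' of a negative number). -/
def getnumA (num : Int) : Option Int :=
  (PySem.Int.toChars num).foldl
    (fun acc c => acc.bind fun t => (PySem.Int.ofChars? [c]).map fun d => t + d)
    (some 0)

/-- A's `while t > target` loop over state (n, res, index, rindex, t); `st = str(n)` is
recomputed each pass as in the source. The fuel argument only makes the recursion total:
Python diverges when it runs out (possible only outside `Pre_`), and the `none` branches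
are Python's IndexError/ValueError (also unreachable inside `Pre_`). -/
def loopA (target : Int) : Nat → Int → Int → Int → Nat → Int → Int
  | 0, _, res, _, _, _ => res
  | fuel+1, n, res, index, rindex, t =>
    if t > target then
      let st := PySem.Int.toChars n
      match PySem.List.pyGet? st index with
      | none => res
      | some c =>
        match PySem.Int.ofChars? [c] with
        | none => res
        | some dig =>
          let extra := (10 - dig) * 10 ^ rindex
          let res' := res + extra
          let n' := n + extra
          match getnumA n' with
          | none => res'
          | some t' => loopA target fuel n' res' (index - 1) (rindex + 1) t'
    else res

def makeIntegerBeautiful (n : Int) (target : Int) : Int :=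
  match getnumA n with
  | none => 0   -- `t = getnum(n)` raises ValueError here (n < 0); outside Pre_
  | some t =>
    let st := PySem.Int.toChars n
    loopA target (st.length + 1) n 0 ((st.length : Int) - 1) 0 t

-- ===== PORT B =====

/-- B's `carry`: add 1 to an LSB-first digit list, propagating past 9s. -/
def carryB : List Int → List Int
  | [] => [1]
  | d :: ds => if d = 9 then 0 :: carryB ds else (d + 1) :: ds

/-- B's `value`: `v = 0; for d in reversed(ds): v = v*10 + d`. -/
def valueB (ds : List Int) : Int :=
  ds.reverse.foldl (fun v d => v * 10 + d) 0

/-- B's recursion `go(ds, s, zeros)`; fuel only makes it total (Python B diverges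
with A outside `Pre_`). -/
def goB (n target : Int) : Nat → List Int → Int → Nat → Int
  | 0, ds, _, zeros => valueB ds * 10 ^ zeros - n
  | fuel+1, ds, s, zeros =>
    if s ≤ target then valueB ds * 10 ^ zeros - n
    else
      let ds2 := carryB ds.tail
      goB n target fuel ds2 ds2.sum (zeros + 1)

def makeIntegerBeautiful_alt (n : Int) (target : Int) : Int :=
  match (PySem.Int.toChars n).mapM (fun c => PySem.Int.ofChars? [c]) with
  | none => 0   -- `int(c)` raises ValueError here (n < 0); outside Pre_
  | some digits =>
    let ds0 := digits.reverse
    goB n target (digits.length + 1) ds0 ds0.sum 0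

-- ===== PRECONDITION & SPEC =====
-- Pre_ is exactly where the Python A returns: n < 0 raises ValueError in getnum, and for
-- n > 0 with target ≤ 0 (or n = 0 with target < 0) the while loop never terminates.
def Pre_makeIntegerBeautiful (n : Int) (target : Int) : Prop :=
  0 ≤ n ∧ (1 ≤ target ∨ (n = 0 ∧ 0 ≤ target))
instance (n : Int) (target : Int) : Decidable (Pre_makeIntegerBeautiful n target) := by
  unfold Pre_makeIntegerBeautiful; infer_instance

def pvWitness_makeIntegerBeautiful : Int × Int := (467, 6)

def Spec_makeIntegerBeautiful (n : Int) (target : Int) (out : Int) : Prop := out = makeIntegerBeautiful_alt n target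
instance (n : Int) (target : Int) (out : Int) : Decidable (Spec_makeIntegerBeautiful n target out) := by unfold Spec_makeIntegerBeautiful; infer_instance

-- ===== CLAIM (what is proved, stated in full; the proofs are below) =====
def Claim_equal_makeIntegerBeautiful : Prop := ∀ (n : Int) (target : Int), Dom_makeIntegerBeautiful n target → Pre_makeIntegerBeautiful n target → Spec_makeIntegerBeautiful n target (makeIntegerBeautiful n target)

-- ===== LEMMAS AND PROOFS =====

lemma toDigitsCore10 : ∀ (f n : Nat) (ds : List Char), n < f →
    Nat.toDigitsCore 10 f n ds =
      (if n = 0 then ['0'] else ((Nat.digits 10 n).map Nat.digitChar).reverse) ++ ds := by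
  intro f
  induction f with
  | zero => intro n ds h; omega
  | succ f ih =>
    intro n ds h
    by_cases h0 : n = 0
    · subst h0; simp [Nat.toDigitsCore]; decide
    · by_cases h10 : n / 10 = 0
      · have hn10 : n < 10 := by omega
        simp [Nat.toDigitsCore, h10, Nat.digits_of_lt 10 n h0 hn10, Nat.mod_eq_of_lt hn10, h0]
      · have hlt : n / 10 < f := by omega
        have hrec := ih (n / 10) (Nat.digitChar (n % 10) :: ds) hlt
        simp only [Nat.toDigitsCore, h10, hrec, if_neg h0]
        rw [Nat.digits_def' (by norm_num : (1:ℕ) < 10) (Nat.pos_of_ne_zero h0)]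
        simp

lemma toChars_nat (m : Nat) :
    PySem.Int.toChars (m : Int) =
      (if m = 0 then ['0'] else ((Nat.digits 10 m).map Nat.digitChar).reverse) := by
  have h : ¬ ((m : Int) < 0) := by omega
  simp only [PySem.Int.toChars, if_neg h, Int.toNat_natCast, Nat.toDigits]
  rw [toDigitsCore10 (m + 1) m [] (by omega), List.append_nil]

lemma sum_digits_pow10 (L : Nat) : (Nat.digits 10 (10 ^ L)).sum = 1 := by
  have h : (10:ℕ) ^ L = 10 ^ L * 1 := by ring
  rw [h, Nat.digits_base_pow_mul (by norm_num) one_pos]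
  simp

lemma ofChars_digitChar (d : Nat) (h : d < 10) :
    PySem.Int.ofChars? [Nat.digitChar d] = some (d : Int) := by
  interval_cases d <;> decide

lemma foldl_digitChars (ds : List Nat) (hds : ∀ d ∈ ds, d < 10) (a : Int) :
    (ds.map Nat.digitChar).foldl
      (fun acc c => acc.bind fun t => (PySem.Int.ofChars? [c]).map fun d => t + d)
      (some a) = some (a + ds.sum) := by
  induction ds generalizing a with
  | nil => simp
  | cons d ds ih =>
    simp only [List.map_cons, List.foldl_cons, Option.bind_some,
      ofChars_digitChar d (hds d (List.mem_cons_self)), Option.map_some]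
    rw [ih (fun x hx => hds x (List.mem_cons_of_mem d hx)) (a + d)]
    congr 1
    simp only [List.sum_cons]
    push_cast
    ring

lemma mapM_digitChars (ds : List Nat) (hds : ∀ d ∈ ds, d < 10) :
    ((ds.map Nat.digitChar).mapM fun c => PySem.Int.ofChars? [c])
      = some (ds.map (Nat.cast : Nat → Int)) := by
  induction ds with
  | nil => rfl
  | cons d ds ih =>
    simp only [List.map_cons, List.mapM_cons,
      ofChars_digitChar d (hds d (List.mem_cons_self)),
      ih (fun x hx => hds x (List.mem_cons_of_mem d hx))]
    rfl

lemma getnumA_nat (m : Nat) :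
    getnumA (m : Int) = some ((Nat.digits 10 m).sum : Int) := by
  unfold getnumA
  rw [toChars_nat]
  by_cases h0 : m = 0
  · subst h0; decide
  · rw [if_neg h0, ← List.map_reverse,
      foldl_digitChars _ (fun d hd => Nat.digits_lt_base (by norm_num) (List.mem_reverse.mp hd)) 0]
    simp

/-- `carryB` on the canonical digit list of `x` is the digit list of `x + 1`. -/
lemma carry_digits (x : Nat) :
    carryB ((Nat.digits 10 x).map (Nat.cast : Nat → Int))
      = (Nat.digits 10 (x + 1)).map (Nat.cast : Nat → Int) := by
  induction x using Nat.strong_induction_on with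
  | _ x ih =>
    by_cases h0 : x = 0
    · subst h0; decide
    · rw [Nat.digits_def' (by norm_num : (1:ℕ) < 10) (Nat.pos_of_ne_zero h0)]
      by_cases h9 : x % 10 = 9
      · have e1 : (x + 1) % 10 = 0 := by omega
        have e2 : (x + 1) / 10 = x / 10 + 1 := by omega
        rw [Nat.digits_def' (by norm_num : (1:ℕ) < 10) (show 0 < x + 1 by omega), e1, e2]
        simp only [List.map_cons, carryB, h9, Nat.cast_ofNat, Nat.cast_zero]
        rw [if_pos trivial, ih (x / 10) (by omega)]
      · have hlt : x % 10 < 10 := Nat.mod_lt _ (by norm_num)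
        have e1 : (x + 1) % 10 = x % 10 + 1 := by omega
        have e2 : (x + 1) / 10 = x / 10 := by omega
        rw [Nat.digits_def' (by norm_num : (1:ℕ) < 10) (show 0 < x + 1 by omega), e1, e2]
        simp only [List.map_cons, carryB]
        rw [if_neg (by exact_mod_cast h9)]
        push_cast
        ring_nf

lemma valueB_digits : ∀ (L : List Nat),
    valueB (L.map (Nat.cast : Nat → Int)) = (((Nat.ofDigits 10 L : ℕ)) : Int) := by
  intro L
  induction L with
  | nil => simp [valueB, Nat.ofDigits]
  | cons d L ih =>
    simp only [valueB, List.map_cons, List.reverse_cons, List.foldl_append, List.foldl_cons,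
      List.foldl_nil] at *
    rw [ih, Nat.ofDigits_cons]
    push_cast
    ring

lemma sum_map_cast (L : List Nat) : (L.map (Nat.cast : Nat → Int)).sum = (L.sum : Int) :=
  (Nat.cast_list_sum _).symm

lemma digitsum_mul_pow (r q : Nat) (hq : 0 < q) :
    (Nat.digits 10 (10 ^ r * q)).sum = (Nat.digits 10 q).sum := by
  rw [Nat.digits_base_pow_mul (by norm_num) hq]
  simp

/-- Both loops advance through the same sequence of rounded values. -/
lemma loop_eq (fuel : Nat) : ∀ (r q n₀ : Nat) (target : Int), 1 ≤ target → 0 < n₀ → 0 < q →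
    n₀ ≤ 10 ^ r * q → 10 ^ r * q ≤ 10 ^ (Nat.digits 10 n₀).length →
    loopA target fuel ((10 ^ r * q : Nat) : Int) (((10 ^ r * q : Nat) : Int) - (n₀ : Int))
      (((Nat.digits 10 n₀).length : Int) - 1 - r) r ((Nat.digits 10 (10 ^ r * q)).sum : Int)
    = goB (n₀ : Int) target fuel ((Nat.digits 10 q).map (Nat.cast : Nat → Int))
        ((Nat.digits 10 q).sum : Int) r := by
  induction fuel with
  | zero =>
    intro r q n₀ target _ _ hq _ _
    simp only [loopA, goB, valueB_digits, Nat.ofDigits_digits]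
    push_cast
    ring
  | succ fuel ih =>
    intro r q n₀ target h1 hpos hq hle hub
    set m := 10 ^ r * q with hm
    set L := (Nat.digits 10 n₀).length with hLdef
    have hm0 : 0 < m := by positivity
    have hsum : (Nat.digits 10 m).sum = (Nat.digits 10 q).sum := digitsum_mul_pow r q hq
    rw [loopA, goB]
    by_cases hS : ((Nat.digits 10 m).sum : Int) > target
    case neg =>
      rw [if_neg hS, if_pos (by rw [← hsum]; omega)]
      simp only [valueB_digits, Nat.ofDigits_digits]
      rw [hm]
      push_cast
      ring
    rw [if_pos hS, if_neg (by rw [← hsum] at *; omega)]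
    dsimp only
    -- m is not a power of ten: its digit sum is at least 2
    have hS2 : 2 ≤ (Nat.digits 10 m).sum := by
      have : (1:Int) < ((Nat.digits 10 m).sum : Int) := lt_of_le_of_lt h1 hS
      exact_mod_cast this
    have hne : m ≠ 10 ^ L := by
      intro h; rw [h, sum_digits_pow10] at hS2; omega
    have hub' : m < 10 ^ L := lt_of_le_of_ne hub hne
    -- str(m) still has exactly L digits
    have hlen : (Nat.digits 10 m).length = L := by
      have le1 : L ≤ (Nat.digits 10 m).length := Nat.le_length_digits_le 10 n₀ m hle
      have le2 : (Nat.digits 10 m).length ≤ L := by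
        by_contra hc
        have h5 : 10 ^ (L + 1) ≤ 10 ^ (Nat.digits 10 m).length :=
          Nat.pow_le_pow_right (by norm_num) (by omega)
        have h6 : 10 ^ (Nat.digits 10 m).length ≤ 10 * m :=
          Nat.base_pow_length_digits_le 10 m (by norm_num) (by omega)
        have h7 : 10 * 10 ^ L ≤ 10 * m := by
          calc 10 * 10 ^ L = 10 ^ (L + 1) := by ring
          _ ≤ _ := le_trans h5 h6
        omega
      omega
    have hrL : r < L := by
      have h8 : 10 ^ r ≤ m := Nat.le_of_dvd hm0 ⟨q, rfl⟩
      have := lt_of_le_of_lt h8 hub'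
      exact (Nat.pow_lt_pow_iff_right (by norm_num)).mp this
    -- the character A reads is digit r of m, i.e. digit 0 of q
    have hidx : (((L : Int) - 1 - r)) = ((L - 1 - r : Nat) : Int) := by omega
    have hlt2 : L - 1 - r < ((Nat.digits 10 m).map Nat.digitChar).reverse.length := by
      simp [hlen]; omega
    have hr' : r < (Nat.digits 10 m).length := by omega
    have hget : PySem.List.pyGet? (PySem.Int.toChars (m:Int)) ((L : Int) - 1 - r)
        = some (Nat.digitChar ((Nat.digits 10 m)[r]'hr')) := by
      rw [toChars_nat, if_neg (by omega), hidx, PySem.List.pyGet?_natCast,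
        List.getElem?_eq_getElem hlt2]
      congr 1
      rw [List.getElem_reverse]
      have hidx3 : (List.map Nat.digitChar (Nat.digits 10 m)).length - 1 - (L - 1 - r) = r := by
        simp [hlen]; omega
      simp only [hidx3, List.getElem_map]
    rw [hget]
    set dv := (Nat.digits 10 m)[r]'hr' with hdv
    have hdvlt : dv < 10 := Nat.digits_lt_base (by norm_num) (List.getElem_mem hr')
    have hdveq : dv = q % 10 := by
      rw [hdv, ← List.getD_eq_getElem _ 0 hr', Nat.getD_digits m r (by norm_num), hm,
        Nat.mul_div_cancel_left q (by positivity : (0:ℕ) < 10 ^ r)]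
    dsimp only
    rw [ofChars_digitChar dv hdvlt]
    dsimp only
    -- the new value after the step, on both sides
    set q' := q / 10 + 1 with hq'
    set m' := 10 ^ (r + 1) * q' with hm2
    have hstep : m + (10 - dv) * 10 ^ r = m' := by
      rw [hm2, hq', hm, hdveq, pow_succ]
      have hkey : q + (10 - q % 10) = 10 * (q / 10 + 1) := by omega
      calc 10 ^ r * q + (10 - q % 10) * 10 ^ r = 10 ^ r * (q + (10 - q % 10)) := by ring
        _ = 10 ^ r * (10 * (q / 10 + 1)) := by rw [hkey]
        _ = 10 ^ r * 10 * (q / 10 + 1) := by ring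
    have hcast : (m : Int) + (10 - (dv:Int)) * 10 ^ r = (m' : Int) := by
      rw [← hstep]; push_cast [Nat.cast_sub (le_of_lt hdvlt)]; ring
    have hq'pos : 0 < q' := by omega
    have hle' : n₀ ≤ m' := le_trans hle (by omega)
    have hub2 : m' ≤ 10 ^ L := by
      have hqlt : q' ≤ 10 ^ (L - (r + 1)) := by
        have hqq : q < 10 ^ (L - r) := by
          have : 10 ^ r * q < 10 ^ r * 10 ^ (L - r) := by
            rw [← pow_add]
            have : r + (L - r) = L := by omega
            rw [this]; exact hub'
          exact lt_of_mul_lt_mul_left this (by positivity)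
        have : q / 10 < 10 ^ (L - r - 1) := by
          rw [Nat.div_lt_iff_lt_mul (by norm_num)]
          calc q < 10 ^ (L - r) := hqq
          _ = 10 ^ (L - r - 1) * 10 := by rw [← pow_succ]; congr 1; omega
        have he : L - (r + 1) = L - r - 1 := by omega
        rw [he]; omega
      calc m' = 10 ^ (r + 1) * q' := hm2
      _ ≤ 10 ^ (r + 1) * 10 ^ (L - (r + 1)) := Nat.mul_le_mul_left _ hqlt
      _ = 10 ^ L := by rw [← pow_add]; congr 1; omega
    -- A's getnum of the new value
    rw [hcast, getnumA_nat m']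
    dsimp only
    -- B's carry step: tail of digits q is digits (q/10); carry gives digits q'
    have htail : ((Nat.digits 10 q).map (Nat.cast : Nat → Int)).tail
        = (Nat.digits 10 (q / 10)).map (Nat.cast : Nat → Int) := by
      rw [Nat.digits_def' (by norm_num : (1:ℕ) < 10) hq]
      simp
    have hcarry : carryB ((Nat.digits 10 q).map (Nat.cast : Nat → Int)).tail
        = (Nat.digits 10 q').map (Nat.cast : Nat → Int) := by
      rw [htail, carry_digits]
    rw [hcarry, sum_map_cast]
    have hres : (m : Int) - (n₀ : Int) + (10 - (dv:Int)) * 10 ^ r = (m' : Int) - (n₀ : Int) := by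
      rw [← hcast]; ring
    have hidx2 : ((L : Int) - 1 - r) - 1 = (L : Int) - 1 - ((r + 1 : Nat) : Int) := by push_cast; ring
    rw [hres, hidx2]
    have hsum' : (Nat.digits 10 m').sum = (Nat.digits 10 q').sum := digitsum_mul_pow (r + 1) q' hq'pos
    rw [hsum']
    have hfin := ih (r + 1) q' n₀ target h1 hpos hq'pos hle' hub2
    simpa only [← hm2, ← hLdef, hsum'] using hfin

theorem makeIntegerBeautiful_spec_aux (n target : Int)
    (hpre : 0 ≤ n ∧ (1 ≤ target ∨ (n = 0 ∧ 0 ≤ target))) :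
    makeIntegerBeautiful n target = makeIntegerBeautiful_alt n target := by
  obtain ⟨hn, hcase⟩ := hpre
  obtain ⟨m, rfl⟩ := Int.eq_ofNat_of_zero_le hn
  by_cases hm : m = 0
  · subst hm
    have h0 : ¬ ((0:Int) > target) := by
      rcases hcase with h | h
      · omega
      · omega
    have h0' : (0:Int) ≤ target := by omega
    have e1 : getnumA (0 : Int) = some 0 := by decide
    have e3 : PySem.Int.toChars (0 : Int) = ['0'] := by decide
    have e4 : PySem.Int.ofChars? ['0'] = some 0 := by decide
    simp only [Nat.cast_zero]
    unfold makeIntegerBeautiful makeIntegerBeautiful_alt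
    rw [e1, e3]
    simp [loopA, goB, h0, h0', e4, List.mapM_cons, valueB]
  · have ht : 1 ≤ target := by
      rcases hcase with h | h
      · exact h
      · exfalso; exact hm (by exact_mod_cast h.1)
    have hmpos : 0 < m := Nat.pos_of_ne_zero hm
    set L := (Nat.digits 10 m).length with hLdef
    have hchars : PySem.Int.toChars ((m:Nat) : Int) = ((Nat.digits 10 m).map Nat.digitChar).reverse := by
      rw [toChars_nat, if_neg hm]
    have hlen : (PySem.Int.toChars ((m:Nat) : Int)).length = L := by
      rw [hchars]; simp [hLdef]
    have hmapM : (PySem.Int.toChars ((m:ℕ) : Int)).mapM (fun c => PySem.Int.ofChars? [c])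
        = some (((Nat.digits 10 m).reverse).map (Nat.cast : Nat → Int)) := by
      rw [hchars, ← List.map_reverse,
        mapM_digitChars _ (fun d hd => Nat.digits_lt_base (by norm_num) (List.mem_reverse.mp hd))]
    unfold makeIntegerBeautiful makeIntegerBeautiful_alt
    rw [getnumA_nat, hmapM]
    dsimp only
    rw [hlen]
    simp only [List.map_reverse, List.reverse_reverse, List.length_reverse, List.length_map]
    rw [← hLdef, sum_map_cast]
    have h := loop_eq (L + 1) 0 m m target ht hmpos hmpos (by simp) (by
      simpa using (le_of_lt (Nat.lt_base_pow_length_digits (b := 10) (by norm_num) (m := m))))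
    simpa using h

-- ===== VERDICT (by name: the statement is the Claim_ definition above) =====
theorem makeIntegerBeautiful_spec : Claim_equal_makeIntegerBeautiful := by
  intro n target _ hpre
  unfold Pre_makeIntegerBeautiful at hpre
  unfold Spec_makeIntegerBeautiful
  exact makeIntegerBeautiful_spec_aux n target hpre
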